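-- pv_equiv track=rewrite | github.com/ben-128/BaB-GameplayPatch | Data/formations/patch_formations.py | find_fm_entries_in_table
-- ===== SOURCE A (Python) =====
-- def find_fm_entries_in_table(table_entries, original_byte_sizes,
--                              script_start=0, formation_start=0):
--     """Find contiguous sub-sequence whose diffs match formation byte sizes.
--
--     The sub-sequence has N entries (one per formation) and N-1 diffs
--     matching the first N-1 formation byte sizes.
--
--     For single-formation areas (N=1), uses offset calibration: finds a
--     table entry whose implied absolute position matches formation_start.
--
--     Returns (start_index, end_index) or None.
--     """
--     n = len(original_byte_sizes)
--
--     if n == 1 and script_start > 0 and formation_start > 0: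
--         # Single formation: can't match diffs, so find entry by offset.
--         # SP entries give us calibration: the implied base is
--         # script_start + entry_value -> some absolute position.
--         # FM entry value should point to formation_start relative to
--         # the same implied base. We find the base from the first SP
--         # entry (non-zero entry after the initial [entry0, 0] header),
--         # then look for an entry whose base+value == formation_start.
--         #
--         # Alternative: the last non-zero entry before terminal zeros
--         # is likely the single FM entry.
--         for idx in range(len(table_entries) - 1, -1, -1):
--             val = table_entries[idx]
--             if val != 0:
--                 # Check if this is the last non-zero before terminal zeros
--                 # (all entries after it should be zero)
--                 all_zero_after = all(
--                     v == 0 for v in table_entries[idx + 1:])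
--                 if all_zero_after:
--                     return (idx, idx)
--                 break
--         return None
--
--     if n < 2:
--         return None
--
--     expected_diffs = original_byte_sizes[:-1]
--
--     for start_idx in range(len(table_entries) - n + 1):
--         sub = table_entries[start_idx:start_idx + n]
--         if 0 in sub:
--             continue
--         diffs = [sub[i + 1] - sub[i] for i in range(n - 1)]
--         if diffs == expected_diffs:
--             return (start_idx, start_idx + n - 1)
--
--     return None
-- ===== SOURCE B (Python) =====
-- def find_fm_entries_in_table(table_entries, original_byte_sizes,
--                              script_start=0, formation_start=0):
--     n = len(original_byte_sizes)
--     L = len(table_entries)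
--
--     if n == 1 and script_start > 0 and formation_start > 0:
--         # Last non-zero entry; everything after it is zero by construction.
--         for idx in range(L - 1, -1, -1):
--             if table_entries[idx] != 0:
--                 return (idx, idx)
--         return None
--
--     if n < 2:
--         return None
--
--     pattern = original_byte_sizes[:-1]
--     # Consecutive diffs, computed once for the whole table.
--     diffs = [b - a for a, b in zip(table_entries, table_entries[1:])]
--     # Prefix counts of zero entries: a window is zero-free iff the count is flat.
--     z = [0] * (L + 1)
--     for i, v in enumerate(table_entries):
--         z[i + 1] = z[i] + (1 if v == 0 else 0)
--     m = n - 1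
--
--     for s in range(L - n + 1):
--         if z[s + n] == z[s] and diffs[s:s + m] == pattern:
--             return (s, s + n - 1)
--     return None
-- ===== Notes on version B (the rewrite author's own statement) =====
-- stated objective: alternative
-- what changed: B precomputes the consecutive-diff array and zero prefix counts once and tests each window by an O(1) prefix-count comparison plus one diff-slice comparison, instead of A's per-window table slice, zero-membership scan and diff-list reconstruction; the N=1 branch returns the last non-zero index directly, dropping A's redundant all-zero-after rescan.
import Mathlib
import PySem

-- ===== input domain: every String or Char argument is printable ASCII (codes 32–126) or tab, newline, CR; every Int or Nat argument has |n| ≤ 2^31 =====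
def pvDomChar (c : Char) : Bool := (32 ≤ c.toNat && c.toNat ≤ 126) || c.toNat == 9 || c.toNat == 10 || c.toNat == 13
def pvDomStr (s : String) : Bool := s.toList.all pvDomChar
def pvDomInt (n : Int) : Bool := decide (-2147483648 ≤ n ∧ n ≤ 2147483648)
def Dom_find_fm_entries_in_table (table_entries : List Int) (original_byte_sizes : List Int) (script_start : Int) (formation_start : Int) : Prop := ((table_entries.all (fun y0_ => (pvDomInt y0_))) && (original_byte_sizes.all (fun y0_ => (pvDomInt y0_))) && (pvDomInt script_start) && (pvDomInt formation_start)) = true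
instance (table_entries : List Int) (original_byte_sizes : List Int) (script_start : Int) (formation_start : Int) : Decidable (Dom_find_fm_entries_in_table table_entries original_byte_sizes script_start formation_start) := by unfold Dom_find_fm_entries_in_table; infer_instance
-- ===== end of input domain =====

-- B tests each window against a diff array and zero prefix counts computed once, instead of A's
-- per-window slice, zero-membership scan and diff-list reconstruction; B's N=1 branch returns the
-- last non-zero index directly, dropping A's redundant all-zero-after rescan (alternative algorithm).

-- ===== PORT A =====

-- for idx in range(len(table_entries)-1, -1, -1): …  (first non-zero from the end; 'break' → None)
def pvA_descLoop (t : List Int) : List Int → Option (Int × Int)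
  | [] => none
  | idx :: rest =>
    let val := PySem.List.pyGetD t idx 0
    if val ≠ 0 then
      if (PySem.List.slice t (some (idx + 1)) none).all (fun v => v == 0) then some (idx, idx)
      else none
    else pvA_descLoop t rest

-- for start_idx in range(len(table_entries) - n + 1): …
def pvA_mainLoop (t : List Int) (n : Nat) (expected : List Int) : List Int → Option (Int × Int)
  | [] => none
  | s :: rest =>
    let sub := PySem.List.slice t (some s) (some (s + (n : Int)))
    if (0 : Int) ∈ sub then pvA_mainLoop t n expected rest
    else
      let diffs := (PySem.List.pyRange 0 ((n : Int) - 1) 1).map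
        (fun i => PySem.List.pyGetD sub (i + 1) 0 - PySem.List.pyGetD sub i 0)
      if diffs = expected then some (s, s + (n : Int) - 1)
      else pvA_mainLoop t n expected rest

def find_fm_entries_in_table (table_entries : List Int) (original_byte_sizes : List Int) (script_start : Int) (formation_start : Int) : Option (Int × Int) :=
  let n := original_byte_sizes.length
  if n = 1 ∧ script_start > 0 ∧ formation_start > 0 then
    pvA_descLoop table_entries (PySem.List.pyRange (PySem.List.len table_entries - 1) (-1) (-1))
  else if n < 2 then none
  else
    let expected := PySem.List.slice original_byte_sizes none (some (-1))
    pvA_mainLoop table_entries n expected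
      (PySem.List.pyRange 0 (PySem.List.len table_entries - (n : Int) + 1) 1)

-- ===== PORT B =====

-- for idx in range(L-1, -1, -1): if table_entries[idx] != 0: return (idx, idx)
def pvB_descLoop (t : List Int) : List Int → Option (Int × Int)
  | [] => none
  | idx :: rest =>
    if PySem.List.pyGetD t idx 0 ≠ 0 then some (idx, idx) else pvB_descLoop t rest

-- z[i+1] = z[i] + (1 if v == 0 else 0)
def pvB_zAux : List Int → Int → List Int
  | [], _ => []
  | v :: rest, acc =>
    let acc' := acc + (if v = 0 then 1 else 0)
    acc' :: pvB_zAux rest acc'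

def pvB_z (t : List Int) : List Int := 0 :: pvB_zAux t 0

-- for s in range(L - n + 1): …
def pvB_mainLoop (diffs pattern z : List Int) (n m : Nat) : List Int → Option (Int × Int)
  | [] => none
  | s :: rest =>
    if PySem.List.pyGetD z (s + (n : Int)) 0 = PySem.List.pyGetD z s 0 ∧
        PySem.List.slice diffs (some s) (some (s + (m : Int))) = pattern then
      some (s, s + (n : Int) - 1)
    else pvB_mainLoop diffs pattern z n m rest

def find_fm_entries_in_table_alt (table_entries : List Int) (original_byte_sizes : List Int) (script_start : Int) (formation_start : Int) : Option (Int × Int) :=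
  let n := original_byte_sizes.length
  if n = 1 ∧ script_start > 0 ∧ formation_start > 0 then
    pvB_descLoop table_entries (PySem.List.pyRange (PySem.List.len table_entries - 1) (-1) (-1))
  else if n < 2 then none
  else
    let pattern := PySem.List.slice original_byte_sizes none (some (-1))
    let diffs := (table_entries.zip (PySem.List.slice table_entries (some 1) none)).map
      (fun p => p.2 - p.1)
    let z := pvB_z table_entries
    let m := n - 1
    pvB_mainLoop diffs pattern z n m
      (PySem.List.pyRange 0 (PySem.List.len table_entries - (n : Int) + 1) 1)

-- ===== PRECONDITION & SPEC =====
def Spec_find_fm_entries_in_table (table_entries : List Int) (original_byte_sizes : List Int) (script_start : Int) (formation_start : Int) (out : Option (Int × Int)) : Prop := out = find_fm_entries_in_table_alt table_entries original_byte_sizes script_start formation_start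
instance (table_entries : List Int) (original_byte_sizes : List Int) (script_start : Int) (formation_start : Int) (out : Option (Int × Int)) : Decidable (Spec_find_fm_entries_in_table table_entries original_byte_sizes script_start formation_start out) := by unfold Spec_find_fm_entries_in_table; infer_instance

-- ===== CLAIM (what is proved, stated in full; the proofs are below) =====
def Claim_equal_find_fm_entries_in_table : Prop := ∀ (table_entries : List Int) (original_byte_sizes : List Int) (script_start : Int) (formation_start : Int), Dom_find_fm_entries_in_table table_entries original_byte_sizes script_start formation_start → Spec_find_fm_entries_in_table table_entries original_byte_sizes script_start formation_start (find_fm_entries_in_table table_entries original_byte_sizes script_start formation_start)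

-- ===== LEMMAS AND PROOFS =====

lemma pv_desc_eq (t : List Int) :
    ∀ k : Nat, k ≤ t.length → (t.drop k).all (fun v => v == 0) = true →
    pvA_descLoop t (PySem.List.pyRange ((k : Int) - 1) (-1) (-1))
      = pvB_descLoop t (PySem.List.pyRange ((k : Int) - 1) (-1) (-1)) := by
  intro k
  induction k with
  | zero =>
    intro _ _
    rw [PySem.List.pyRange_neg_one_eq_nil (by norm_num)]
    rfl
  | succ k ih =>
    intro hk hz
    have hklt : k < t.length := by omega
    have h1 : ((k + 1 : Nat) : Int) - 1 = (k : Int) := by push_cast; ring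
    rw [h1, PySem.List.pyRange_neg_one_cons (by omega)]
    simp only [pvA_descLoop, pvB_descLoop]
    have hval : PySem.List.pyGetD t (k : Int) 0 = t[k] := by
      simp [PySem.List.pyGetD_natCast, List.getD_eq_getElem?_getD, hklt]
    rw [hval]
    by_cases h0 : t[k] = 0
    · simp only [h0, ne_eq, not_true_eq_false, if_false]
      apply ih (by omega)
      rw [List.drop_eq_getElem_cons hklt]
      simp [h0, hz]
    · simp only [h0, ne_eq, not_false_eq_true, if_true]
      have hslice : PySem.List.slice t (some ((k : Int) + 1)) none = t.drop (k + 1) := by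
        have : (k : Int) + 1 = ((k + 1 : Nat) : Int) := by push_cast; ring
        rw [this, PySem.List.slice_from_natCast]
      rw [hslice, hz]
      simp

lemma pv_zAux_getD (t : List Int) :
    ∀ (acc : Int) (k : Nat), k < t.length →
    (pvB_zAux t acc).getD k 0 = acc + ((t.take (k + 1)).countP (fun v => v == 0) : Int) := by
  induction t with
  | nil => intro acc k hk; simp at hk
  | cons v rest ih =>
    intro acc k hk
    cases k with
    | zero =>
      by_cases h : v = 0 <;> simp [pvB_zAux, h]
    | succ k =>
      simp only [pvB_zAux, List.getD_cons_succ]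
      rw [ih _ k (by simpa using hk)]
      simp only [List.take_succ_cons, List.countP_cons]
      by_cases h : v = 0
      · simp [h]
        ring
      · simp [h]
lemma pv_z_getD (t : List Int) (k : Nat) (hk : k ≤ t.length) :
    (pvB_z t).getD k 0 = ((t.take k).countP (fun v => v == 0) : Int) := by
  cases k with
  | zero => simp [pvB_z]
  | succ k =>
    simp only [pvB_z, List.getD_cons_succ]
    rw [pv_zAux_getD t 0 k (by omega)]
    simp

lemma pv_check_eq (t : List Int) (n sn : Nat) (hn : 2 ≤ n) (hb : sn + n ≤ t.length) :
    (PySem.List.pyRange 0 ((n : Int) - 1) 1).map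
        (fun i => PySem.List.pyGetD ((t.drop sn).take n) (i + 1) 0
          - PySem.List.pyGetD ((t.drop sn).take n) i 0)
      = (((t.zip (PySem.List.slice t (some 1) none)).map (fun p => p.2 - p.1)).drop sn).take (n - 1) := by
  have hcast : (n : Int) - 1 = ((n - 1 : Nat) : Int) := by omega
  rw [hcast, PySem.List.slice_from_one, PySem.List.pyRange_zero_natCast, List.map_map]
  simp only [Function.comp_def]
  have hdlen : ((t.zip t.tail).map (fun p : Int × Int => p.2 - p.1)).length = t.length - 1 := by
    simp [List.length_zip, List.length_tail]
  have hsub : ∀ j : Nat, j < n → ((t.drop sn).take n).getD j 0 = t.getD (sn + j) 0 := by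
    intro j hj
    simp [List.getD_eq_getElem?_getD, List.getElem?_drop, hj]
  apply List.ext_getElem
  · simp [hdlen]; omega
  · intro i h1 h2
    have hi : i < n - 1 := by simpa using h1
    simp only [List.getElem_map, List.getElem_range, List.getElem_take, List.getElem_drop,
      List.getElem_zip, List.getElem_tail]
    have hc1 : ((i : Nat) : Int) + 1 = ((i + 1 : Nat) : Int) := by push_cast; ring
    rw [hc1, PySem.List.pyGetD_natCast, PySem.List.pyGetD_natCast,
      hsub (i + 1) (by omega), hsub i (by omega),
      List.getD_eq_getElem _ _ (by omega), List.getD_eq_getElem _ _ (by omega)]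
    congr 2

lemma pv_zwin_iff (t : List Int) (n sn : Nat) (hb : sn + n ≤ t.length) :
    (PySem.List.pyGetD (pvB_z t) ((sn : Int) + (n : Int)) 0
        = PySem.List.pyGetD (pvB_z t) (sn : Int) 0)
      ↔ (0 : Int) ∉ (t.drop sn).take n := by
  have h1 : ((sn : Int) + (n : Int)) = ((sn + n : Nat) : Int) := by push_cast; ring
  rw [h1, PySem.List.pyGetD_natCast, PySem.List.pyGetD_natCast,
    pv_z_getD t (sn + n) hb, pv_z_getD t sn (by omega)]
  rw [List.take_add, List.countP_append]
  constructor
  · intro h hmem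
    have hz : ((t.drop sn).take n).countP (fun v => v == 0) = 0 := by exact_mod_cast by omega
    rw [List.countP_eq_zero] at hz
    exact hz 0 hmem (by simp)
  · intro h
    have hz : ((t.drop sn).take n).countP (fun v => v == 0) = 0 := by
      rw [List.countP_eq_zero]
      intro a ha hc
      have : a = 0 := by simpa using hc
      exact h (this ▸ ha)
    omega

lemma pv_main_eq (t sizes : List Int) (n : Nat) (hn : 2 ≤ n) (hsz : sizes.length = n) :
    ∀ idxs : List Int, (∀ s ∈ idxs, 0 ≤ s ∧ s.toNat + n ≤ t.length) →
    pvA_mainLoop t n (PySem.List.slice sizes none (some (-1))) idxs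
      = pvB_mainLoop ((t.zip (PySem.List.slice t (some 1) none)).map (fun p => p.2 - p.1))
          (PySem.List.slice sizes none (some (-1))) (pvB_z t) n (n - 1) idxs := by
  intro idxs
  induction idxs with
  | nil => intro _; rfl
  | cons s rest ih =>
    intro hbnd
    obtain ⟨hs0, hsL⟩ := hbnd s (List.mem_cons_self)
    have hrest := ih (fun x hx => hbnd x (List.mem_cons_of_mem _ hx))
    have hsn : s = (s.toNat : Int) := (Int.toNat_of_nonneg hs0).symm
    simp only [pvA_mainLoop, pvB_mainLoop]
    have hslice : PySem.List.slice t (some s) (some (s + (n : Int))) = (t.drop s.toNat).take n := by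
      rw [hsn]
      have h2 : ((s.toNat : Int)) + (n : Int) = ((s.toNat + n : Nat) : Int) := by push_cast; ring
      rw [h2, PySem.List.slice_natCast]
      congr 1
      omega
    rw [hslice]
    have hslB : PySem.List.slice
          ((t.zip (PySem.List.slice t (some 1) none)).map (fun p => p.2 - p.1))
          (some s) (some (s + ((n - 1 : Nat) : Int)))
        = (((t.zip (PySem.List.slice t (some 1) none)).map (fun p => p.2 - p.1)).drop s.toNat).take (n - 1) := by
      rw [hsn]
      have h2 : ((s.toNat : Int)) + ((n - 1 : Nat) : Int) = ((s.toNat + (n - 1) : Nat) : Int) := by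
        push_cast; ring
      rw [h2, PySem.List.slice_natCast]
      congr 1
      omega
    rw [hslB]
    have hiff1 : (PySem.List.pyGetD (pvB_z t) (s + (n : Int)) 0 = PySem.List.pyGetD (pvB_z t) s 0)
        ↔ (0 : Int) ∉ (t.drop s.toNat).take n := by
      rw [hsn]
      exact pv_zwin_iff t n s.toNat hsL
    have hEq := pv_check_eq t n s.toNat hn hsL
    by_cases hz : (0 : Int) ∈ (t.drop s.toNat).take n
    · rw [if_pos hz, if_neg (by rw [hiff1]; tauto), hrest]
    · rw [if_neg hz]
      by_cases hd : (PySem.List.pyRange 0 ((n : Int) - 1) 1).map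
          (fun i => PySem.List.pyGetD ((t.drop s.toNat).take n) (i + 1) 0
            - PySem.List.pyGetD ((t.drop s.toNat).take n) i 0)
          = PySem.List.slice sizes none (some (-1))
      · rw [if_pos hd, if_pos ⟨hiff1.mpr hz, by rw [← hEq]; exact hd⟩]
      · rw [if_neg hd, if_neg (by rw [← hEq]; tauto), hrest]

-- ===== VERDICT (by name: the statement is the Claim_ definition above) =====
theorem find_fm_entries_in_table_spec : Claim_equal_find_fm_entries_in_table := by
  intro t sizes ss fs _
  unfold Spec_find_fm_entries_in_table find_fm_entries_in_table find_fm_entries_in_table_alt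
  by_cases h1 : sizes.length = 1 ∧ ss > 0 ∧ fs > 0
  · simp only [h1]
    have := pv_desc_eq t t.length le_rfl (by simp)
    simpa using this
  · simp only [h1, if_false]
    by_cases h2 : sizes.length < 2
    · simp [h2]
    · simp only [h2, if_false]
      apply pv_main_eq t sizes sizes.length (by omega) rfl
      intro s hs
      rw [PySem.List.mem_pyRange_one] at hs
      simp only [PySem.List.len_eq] at hs
      omega
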